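-- pv_equiv track=rewrite | github.com/dcuturic/ki_baddie | blend_to_vrm/converter.py | _normalize_for_match
-- ===== SOURCE A (Python) =====
-- def _normalize_for_match(name):
--     """Normalize bone/pattern name: strip suffixes/prefixes, unify separators to underscore."""
--     n = name.lower().strip()
--     # Strip common bone suffixes
--     for suffix in ["_jnt", ".jnt", "_bone", ".bone", "_bn", ".bn", "_joint", ".joint",
--                     "_def", ".def", "_sk", "_end", ".end", "_null", ".null"]:
--         if n.endswith(suffix):
--             n = n[:-len(suffix)]
--             break
--     # Strip common prefixes
--     for prefix in ["def-", "def_", "org-", "org_", "mch-", "mch_", "jnt_", "jnt-",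
--                     "bn_", "bone_", "bip_", "bip01_", "bip01 ",
--                     "j_", "sk_", "b_", "mixamorig:", "mixamorig_",
--                     "valvebip01_", "rig_"]:
--         if n.startswith(prefix):
--             n = n[len(prefix):]
--             break
--     # Unify ALL separators to underscore
--     n = n.replace(".", "_").replace("-", "_").replace(" ", "_")
--     while "__" in n:
--         n = n.replace("__", "_")
--     return n.strip("_")
-- ===== SOURCE B (Python) =====
-- _SUF_BY_LEN = {
--     6: {"_joint", ".joint"},
--     5: {"_bone", ".bone", "_null", ".null"},
--     4: {"_jnt", ".jnt", "_def", ".def", "_end", ".end"},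
--     3: {"_bn", ".bn", "_sk"},
-- }
-- _PRE_BY_LEN = {
--     11: {"valvebip01_"},
--     10: {"mixamorig:", "mixamorig_"},
--     6: {"bip01_", "bip01 "},
--     5: {"bone_"},
--     4: {"def-", "def_", "org-", "org_", "mch-", "mch_", "jnt_", "jnt-", "bip_", "rig_"},
--     3: {"sk_", "bn_"},
--     2: {"j_", "b_"},
-- }
--
-- def _normalize_for_match(name):
--     """Normalize bone/pattern name: strip suffixes/prefixes, unify separators to underscore."""
--     n = name.lower().strip()
--     # No listed suffix is a suffix of another, so at most one can match:
--     # probe the tail slice per length against a set instead of scanning candidates.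
--     for L, sufs in _SUF_BY_LEN.items():
--         if len(n) >= L and n[-L:] in sufs:
--             n = n[:-L]
--             break
--     # Same for prefixes: no listed prefix is a prefix of another.
--     for L, pres in _PRE_BY_LEN.items():
--         if len(n) >= L and n[:L] in pres:
--             n = n[L:]
--             break
--     # One streaming pass: emit a single '_' between runs of non-separator chars.
--     out = []
--     pending = False
--     for c in n:
--         if c in " ._-":
--             pending = bool(out)
--         else:
--             if pending:
--                 out.append("_")
--             out.append(c)
--             pending = False
--     return "".join(out)
-- ===== Notes on version B (the rewrite author's own statement) =====
-- stated objective: alternative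
-- what changed: Affix stripping no longer scans the candidate lists: since no listed suffix/prefix is an affix of another (at most one can match), B probes the tail/head slice of each possible length against a per-length set; and the separator replace-chain plus the repeated collapse loop plus the final outer strip are replaced by one streaming pass with a pending-separator flag that emits a single underscore between runs of non-separator characters.
import Mathlib
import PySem

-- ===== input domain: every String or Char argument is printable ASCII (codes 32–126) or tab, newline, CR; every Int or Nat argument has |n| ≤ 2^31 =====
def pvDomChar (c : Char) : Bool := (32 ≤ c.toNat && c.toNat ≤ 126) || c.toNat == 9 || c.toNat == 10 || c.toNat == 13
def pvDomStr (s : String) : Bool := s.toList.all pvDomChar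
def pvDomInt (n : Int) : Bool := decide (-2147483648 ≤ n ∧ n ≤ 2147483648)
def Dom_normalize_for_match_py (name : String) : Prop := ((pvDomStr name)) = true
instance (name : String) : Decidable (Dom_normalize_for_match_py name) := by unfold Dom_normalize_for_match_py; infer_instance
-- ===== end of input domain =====

-- B replaces A's candidate-list scans by one tail/head-slice set probe per affix length
-- (no listed affix is an affix of another, so at most one can match) and replaces A's
-- replace-chain + repeated double-underscore collapse + outer strip by a single streaming
-- pass with a pending-separator flag (alternative decomposition; same return value).

-- ===== PORT A =====
def pvSuffixes : List (List Char) :=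
  ["_jnt".toList, ".jnt".toList, "_bone".toList, ".bone".toList, "_bn".toList, ".bn".toList,
   "_joint".toList, ".joint".toList, "_def".toList, ".def".toList, "_sk".toList, "_end".toList,
   ".end".toList, "_null".toList, ".null".toList]

def pvPrefixes : List (List Char) :=
  ["def-".toList, "def_".toList, "org-".toList, "org_".toList, "mch-".toList, "mch_".toList,
   "jnt_".toList, "jnt-".toList, "bn_".toList, "bone_".toList, "bip_".toList, "bip01_".toList,
   "bip01 ".toList, "j_".toList, "sk_".toList, "b_".toList, "mixamorig:".toList,
   "mixamorig_".toList, "valvebip01_".toList, "rig_".toList]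

-- the while-loop collapsing double underscores by repeated replace (fuel makes the loop
-- structural; each pass shortens the string, so fuel = length is enough — pvCollapseGo_noDD)
def pvCollapseGo : Nat → List Char → List Char
  | 0, n => n
  | f + 1, n =>
    if PySem.Chars.isIn ['_', '_'] n = true then
      pvCollapseGo f (PySem.Chars.replace n ['_', '_'] ['_'])
    else n

def pvCollapseLoop (n : List Char) : List Char := pvCollapseGo n.length n

-- the suffix loop with break: the first matching suffix is stripped, then the loop stops
def pvStripSufA : List (List Char) → List Char → List Char
  | [], n => n
  | s :: rest, n =>
    if PySem.Chars.endswith n s then PySem.List.slice n none (some (-(s.length : Int)))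
    else pvStripSufA rest n

-- the prefix loop with break
def pvStripPreA : List (List Char) → List Char → List Char
  | [], n => n
  | p :: rest, n =>
    if PySem.Chars.startswith n p then PySem.List.slice n (some (p.length : Int)) none
    else pvStripPreA rest n

def normalize_for_match_py (name : String) : String :=
  let n0 := PySem.Chars.strip (PySem.Chars.lower name.toList)
  let n1 := pvStripSufA pvSuffixes n0
  let n2 := pvStripPreA pvPrefixes n1
  let n3 := PySem.Chars.replace (PySem.Chars.replace (PySem.Chars.replace n2 ['.'] ['_']) ['-'] ['_']) [' '] ['_']
  let n4 := pvCollapseLoop n3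
  String.ofList (PySem.Chars.stripChars n4 ['_'])

-- ===== PORT B =====
def pvSufByLen : List (Nat × List (List Char)) :=
  [(6, ["_joint".toList, ".joint".toList]),
   (5, ["_bone".toList, ".bone".toList, "_null".toList, ".null".toList]),
   (4, ["_jnt".toList, ".jnt".toList, "_def".toList, ".def".toList, "_end".toList, ".end".toList]),
   (3, ["_bn".toList, ".bn".toList, "_sk".toList])]

def pvPreByLen : List (Nat × List (List Char)) :=
  [(11, ["valvebip01_".toList]),
   (10, ["mixamorig:".toList, "mixamorig_".toList]),
   (6, ["bip01_".toList, "bip01 ".toList]),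
   (5, ["bone_".toList]),
   (4, ["def-".toList, "def_".toList, "org-".toList, "org_".toList, "mch-".toList, "mch_".toList,
        "jnt_".toList, "jnt-".toList, "bip_".toList, "rig_".toList]),
   (3, ["sk_".toList, "bn_".toList]),
   (2, ["j_".toList, "b_".toList])]

-- `for L, sufs in _SUF_BY_LEN.items(): if len(n) >= L and n[-L:] in sufs: n = n[:-L]; break`
def pvStripSufB : List (Nat × List (List Char)) → List Char → List Char
  | [], n => n
  | (L, ss) :: rest, n =>
    if L ≤ n.length ∧ ss.contains (PySem.List.slice n (some (-(L : Int))) none) then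
      PySem.List.slice n none (some (-(L : Int)))
    else pvStripSufB rest n

-- `for L, pres in _PRE_BY_LEN.items(): if len(n) >= L and n[:L] in pres: n = n[L:]; break`
def pvStripPreB : List (Nat × List (List Char)) → List Char → List Char
  | [], n => n
  | (L, ps) :: rest, n =>
    if L ≤ n.length ∧ ps.contains (PySem.List.slice n none (some (L : Int))) then
      PySem.List.slice n (some (L : Int)) none
    else pvStripPreB rest n

-- `c in " ._-"` for a single character c = membership in those four characters (exact)
def pvSepB (c : Char) : Bool := c == ' ' || c == '.' || c == '_' || c == '-'

-- the streaming pass: out is the accumulator (built in reverse, reversed at the end =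
-- "".join(out)); pending records whether a separator was seen since the last emitted char
def pvSM : List Char → List Char → Bool → List Char
  | [], out, _ => out.reverse
  | c :: t, out, pending =>
    if pvSepB c then pvSM t out (!out.isEmpty)
    else pvSM t (c :: (if pending then '_' :: out else out)) false

def normalize_for_match_py_alt (name : String) : String :=
  let n0 := PySem.Chars.strip (PySem.Chars.lower name.toList)
  let n1 := pvStripSufB pvSufByLen n0
  let n2 := pvStripPreB pvPreByLen n1
  String.ofList (pvSM n2 [] false)

-- ===== PRECONDITION & SPEC =====
def Spec_normalize_for_match_py (name : String) (out : String) : Prop := out = normalize_for_match_py_alt name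
instance (name : String) (out : String) : Decidable (Spec_normalize_for_match_py name out) := by unfold Spec_normalize_for_match_py; infer_instance

-- ===== CLAIM (what is proved, stated in full; the proofs are below) =====
def Claim_equal_normalize_for_match_py : Prop := ∀ (name : String), Dom_normalize_for_match_py name → Spec_normalize_for_match_py name (normalize_for_match_py name)


-- ===== LEMMAS AND PROOFS =====

-- ---------- affix stripping: A's candidate scan = B's per-length set probes ----------

-- find? is order-independent when at most one element satisfies the predicate
theorem pvFind?_unique (p : List Char → Bool) (l1 l2 : List (List Char))
    (hperm : l1.Perm l2) (hu : ∀ a ∈ l1, ∀ b ∈ l1, p a = true → p b = true → a = b) :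
    l1.find? p = l2.find? p := by
  cases h1 : l1.find? p with
  | none =>
    have hnone := List.find?_eq_none.mp h1
    symm
    apply List.find?_eq_none.mpr
    intro x hx
    exact hnone x (hperm.mem_iff.mpr hx)
  | some a =>
    have hpa := List.find?_some h1
    have hma := List.mem_of_find?_eq_some h1
    have hs : (l2.find? p).isSome := List.find?_isSome.mpr ⟨a, hperm.mem_iff.mp hma, hpa⟩
    obtain ⟨b, hb⟩ := Option.isSome_iff_exists.mp hs
    rw [hb]
    rw [hu a hma b (hperm.mem_iff.mpr (List.mem_of_find?_eq_some hb)) hpa (List.find?_some hb)]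

-- no listed suffix is a suffix of another listed suffix (finite check)
theorem pvSufNoNest : ∀ a ∈ pvSuffixes, ∀ b ∈ pvSuffixes, a.isSuffixOf b = true → a = b := by
  decide

-- hence at most one listed suffix can match a given string
theorem pvSufExcl (n : List Char) : ∀ a ∈ pvSuffixes, ∀ b ∈ pvSuffixes,
    PySem.Chars.endswith n a = true → PySem.Chars.endswith n b = true → a = b := by
  intro a ha b hb ea eb
  have ha' := (PySem.Chars.endswith_iff n a).mp ea
  have hb' := (PySem.Chars.endswith_iff n b).mp eb
  rcases List.suffix_or_suffix_of_suffix ha' hb' with h | h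
  · exact pvSufNoNest a ha b hb (List.isSuffixOf_iff_suffix.mpr h)
  · exact (pvSufNoNest b hb a ha (List.isSuffixOf_iff_suffix.mpr h)).symm

-- no listed prefix is a prefix of another listed prefix (finite check)
theorem pvPreNoNest : ∀ a ∈ pvPrefixes, ∀ b ∈ pvPrefixes, a.isPrefixOf b = true → a = b := by
  decide

theorem pvPreExcl (n : List Char) : ∀ a ∈ pvPrefixes, ∀ b ∈ pvPrefixes,
    PySem.Chars.startswith n a = true → PySem.Chars.startswith n b = true → a = b := by
  intro a ha b hb ea eb
  have ha' := (PySem.Chars.startswith_iff n a).mp ea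
  have hb' := (PySem.Chars.startswith_iff n b).mp eb
  rcases List.prefix_or_prefix_of_prefix ha' hb' with h | h
  · exact pvPreNoNest a ha b hb (List.isPrefixOf_iff_prefix.mpr h)
  · exact (pvPreNoNest b hb a ha (List.isPrefixOf_iff_prefix.mpr h)).symm

-- B's per-length probe condition characterises "v is a suffix of n" for |v| = L
theorem pvTailSliceEq (n v : List Char) (L : Nat) (hL : 0 < L) (hlen : v.length = L) :
    (L ≤ n.length ∧ PySem.List.slice n (some (-(L : Int))) none = v) ↔ v <:+ n := by
  rw [PySem.List.slice_from_neg_natCast n L hL]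
  constructor
  · rintro ⟨hLe, hd⟩
    rw [← hd]
    exact List.drop_suffix _ _
  · intro h
    refine ⟨hlen ▸ h.length_le, ?_⟩
    have hd := List.suffix_iff_eq_drop.mp h
    rw [hlen] at hd
    exact hd.symm

theorem pvHeadSliceEq (n v : List Char) (L : Nat) (hlen : v.length = L) :
    (L ≤ n.length ∧ PySem.List.slice n none (some (L : Int)) = v) ↔ v <+: n := by
  rw [PySem.List.slice_to_natCast n L]
  constructor
  · rintro ⟨hLe, ht⟩
    rw [← ht]
    exact List.take_prefix _ _
  · intro h
    refine ⟨hlen ▸ h.length_le, ?_⟩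
    have ht := List.prefix_iff_eq_take.mp h
    rw [hlen] at ht
    exact ht.symm

-- the break-loops of A compute the first match
theorem pvStripSufA_eq_find (l : List (List Char)) (n : List Char) :
    pvStripSufA l n = match l.find? (fun s => PySem.Chars.endswith n s) with
      | some s => PySem.List.slice n none (some (-(s.length : Int)))
      | none => n := by
  induction l with
  | nil => simp [pvStripSufA]
  | cons s rest ih =>
    cases h : PySem.Chars.endswith n s with
    | true => simp [pvStripSufA, h, List.find?]
    | false => simp [pvStripSufA, h, List.find?, ih]

theorem pvStripPreA_eq_find (l : List (List Char)) (n : List Char) :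
    pvStripPreA l n = match l.find? (fun p => PySem.Chars.startswith n p) with
      | some p => PySem.List.slice n (some (p.length : Int)) none
      | none => n := by
  induction l with
  | nil => simp [pvStripPreA]
  | cons p rest ih =>
    cases h : PySem.Chars.startswith n p with
    | true => simp [pvStripPreA, h, List.find?]
    | false => simp [pvStripPreA, h, List.find?, ih]

-- B's bucket scan computes the first match over the flattened buckets
theorem pvStripSufB_eq_find (n : List Char) : ∀ (bs : List (Nat × List (List Char))),
    (∀ p ∈ bs, 0 < p.1 ∧ ∀ v ∈ p.2, v.length = p.1) →
    (∀ a ∈ bs.flatMap Prod.snd, ∀ b ∈ bs.flatMap Prod.snd,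
        PySem.Chars.endswith n a = true → PySem.Chars.endswith n b = true → a = b) →
    pvStripSufB bs n = match (bs.flatMap Prod.snd).find? (fun s => PySem.Chars.endswith n s) with
      | some s => PySem.List.slice n none (some (-(s.length : Int)))
      | none => n := by
  intro bs
  induction bs with
  | nil => intro _ _; simp [pvStripSufB]
  | cons hd rest ih =>
    obtain ⟨L, ss⟩ := hd
    intro hlen hu
    have hflat : ((L, ss) :: rest).flatMap Prod.snd = ss ++ rest.flatMap Prod.snd := by
      simp
    have hL : 0 < L := (hlen (L, ss) (by simp)).1
    have hss : ∀ v ∈ ss, v.length = L := (hlen (L, ss) (by simp)).2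
    by_cases hc : L ≤ n.length ∧ ss.contains (PySem.List.slice n (some (-(L : Int))) none) = true
    · obtain ⟨h1, h2⟩ := hc
      have hmem : PySem.List.slice n (some (-(L : Int))) none ∈ ss :=
        List.contains_iff_mem.mp h2
      have hvlen := hss _ hmem
      have hvsuf : PySem.List.slice n (some (-(L : Int))) none <:+ n :=
        (pvTailSliceEq n _ L hL hvlen).mp ⟨h1, rfl⟩
      have hev : PySem.Chars.endswith n (PySem.List.slice n (some (-(L : Int))) none) = true :=
        (PySem.Chars.endswith_iff n _).mpr hvsuf
      have hvflat : PySem.List.slice n (some (-(L : Int))) none ∈ ((L, ss) :: rest).flatMap Prod.snd := by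
        rw [hflat]; exact List.mem_append_left _ hmem
      have hsome : ((((L, ss) :: rest).flatMap Prod.snd).find? (fun s => PySem.Chars.endswith n s)).isSome :=
        List.find?_isSome.mpr ⟨_, hvflat, hev⟩
      obtain ⟨s, hs⟩ := Option.isSome_iff_exists.mp hsome
      have hseq : s = PySem.List.slice n (some (-(L : Int))) none :=
        hu s (List.mem_of_find?_eq_some hs) _ hvflat (List.find?_some hs) hev
      rw [pvStripSufB, if_pos ⟨h1, h2⟩, hs, hseq]
      dsimp only
      rw [hvlen]
    · have hnone : ∀ v ∈ ss, PySem.Chars.endswith n v = false := by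
        intro v hvm
        by_contra hne
        have hev : PySem.Chars.endswith n v = true := by
          cases h : PySem.Chars.endswith n v
          · exact absurd h hne
          · rfl
        have hvsuf := (PySem.Chars.endswith_iff n v).mp hev
        have hch := (pvTailSliceEq n v L hL (hss v hvm)).mpr hvsuf
        exact hc ⟨hch.1, by rw [hch.2]; exact List.contains_iff_mem.mpr hvm⟩
      rw [pvStripSufB, if_neg hc, hflat, List.find?_append]
      have hfn : ss.find? (fun s => PySem.Chars.endswith n s) = none :=
        List.find?_eq_none.mpr (fun x hx => by rw [hnone x hx]; simp)
      rw [hfn, Option.none_or]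
      exact ih (fun p hp => hlen p (by simp [hp]))
        (fun a hma b hmb => hu a (by rw [hflat]; exact List.mem_append_right _ hma)
          b (by rw [hflat]; exact List.mem_append_right _ hmb))

theorem pvStripPreB_eq_find (n : List Char) : ∀ (bs : List (Nat × List (List Char))),
    (∀ p ∈ bs, ∀ v ∈ p.2, v.length = p.1) →
    (∀ a ∈ bs.flatMap Prod.snd, ∀ b ∈ bs.flatMap Prod.snd,
        PySem.Chars.startswith n a = true → PySem.Chars.startswith n b = true → a = b) →
    pvStripPreB bs n = match (bs.flatMap Prod.snd).find? (fun p => PySem.Chars.startswith n p) with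
      | some p => PySem.List.slice n (some (p.length : Int)) none
      | none => n := by
  intro bs
  induction bs with
  | nil => intro _ _; simp [pvStripPreB]
  | cons hd rest ih =>
    obtain ⟨L, ps⟩ := hd
    intro hlen hu
    have hflat : ((L, ps) :: rest).flatMap Prod.snd = ps ++ rest.flatMap Prod.snd := by
      simp
    have hss : ∀ v ∈ ps, v.length = L := hlen (L, ps) (by simp)
    by_cases hc : L ≤ n.length ∧ ps.contains (PySem.List.slice n none (some (L : Int))) = true
    · obtain ⟨h1, h2⟩ := hc
      have hmem : PySem.List.slice n none (some (L : Int)) ∈ ps :=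
        List.contains_iff_mem.mp h2
      have hvlen := hss _ hmem
      have hvpre : PySem.List.slice n none (some (L : Int)) <+: n :=
        (pvHeadSliceEq n _ L hvlen).mp ⟨h1, rfl⟩
      have hev : PySem.Chars.startswith n (PySem.List.slice n none (some (L : Int))) = true :=
        (PySem.Chars.startswith_iff n _).mpr hvpre
      have hvflat : PySem.List.slice n none (some (L : Int)) ∈ ((L, ps) :: rest).flatMap Prod.snd := by
        rw [hflat]; exact List.mem_append_left _ hmem
      have hsome : ((((L, ps) :: rest).flatMap Prod.snd).find? (fun p => PySem.Chars.startswith n p)).isSome :=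
        List.find?_isSome.mpr ⟨_, hvflat, hev⟩
      obtain ⟨s, hs⟩ := Option.isSome_iff_exists.mp hsome
      have hseq : s = PySem.List.slice n none (some (L : Int)) :=
        hu s (List.mem_of_find?_eq_some hs) _ hvflat (List.find?_some hs) hev
      rw [pvStripPreB, if_pos ⟨h1, h2⟩, hs, hseq]
      dsimp only
      rw [hvlen]
    · have hnone : ∀ v ∈ ps, PySem.Chars.startswith n v = false := by
        intro v hvm
        by_contra hne
        have hev : PySem.Chars.startswith n v = true := by
          cases h : PySem.Chars.startswith n v
          · exact absurd h hne
          · rfl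
        have hvpre := (PySem.Chars.startswith_iff n v).mp hev
        have hch := (pvHeadSliceEq n v L (hss v hvm)).mpr hvpre
        exact hc ⟨hch.1, by rw [hch.2]; exact List.contains_iff_mem.mpr hvm⟩
      rw [pvStripPreB, if_neg hc, hflat, List.find?_append]
      have hfn : ps.find? (fun p => PySem.Chars.startswith n p) = none :=
        List.find?_eq_none.mpr (fun x hx => by rw [hnone x hx]; simp)
      rw [hfn, Option.none_or]
      exact ih (fun p hp => hlen p (by simp [hp]))
        (fun a hma b hmb => hu a (by rw [hflat]; exact List.mem_append_right _ hma)
          b (by rw [hflat]; exact List.mem_append_right _ hmb))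

-- the flattened buckets are a permutation of A's candidate lists (finite check)
theorem pvSufPerm : (pvSufByLen.flatMap Prod.snd).Perm pvSuffixes := by decide

theorem pvPrePerm : (pvPreByLen.flatMap Prod.snd).Perm pvPrefixes := by decide

theorem pvSufB_eq_A (n : List Char) : pvStripSufB pvSufByLen n = pvStripSufA pvSuffixes n := by
  have hu : ∀ a ∈ pvSufByLen.flatMap Prod.snd, ∀ b ∈ pvSufByLen.flatMap Prod.snd,
      PySem.Chars.endswith n a = true → PySem.Chars.endswith n b = true → a = b :=
    fun a ha b hb ea eb =>
      pvSufExcl n a (pvSufPerm.mem_iff.mp ha) b (pvSufPerm.mem_iff.mp hb) ea eb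
  rw [pvStripSufA_eq_find, pvStripSufB_eq_find n pvSufByLen (by decide) hu,
      pvFind?_unique _ _ _ pvSufPerm hu]

theorem pvPreB_eq_A (n : List Char) : pvStripPreB pvPreByLen n = pvStripPreA pvPrefixes n := by
  have hu : ∀ a ∈ pvPreByLen.flatMap Prod.snd, ∀ b ∈ pvPreByLen.flatMap Prod.snd,
      PySem.Chars.startswith n a = true → PySem.Chars.startswith n b = true → a = b :=
    fun a ha b hb ea eb =>
      pvPreExcl n a (pvPrePerm.mem_iff.mp ha) b (pvPrePerm.mem_iff.mp hb) ea eb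
  rw [pvStripPreA_eq_find, pvStripPreB_eq_find n pvPreByLen (by decide) hu,
      pvFind?_unique _ _ _ pvPrePerm hu]

-- ---------- separator normalisation: A's replace/collapse/strip = B's streaming pass ----------

-- what one replace pass of A's collapse loop computes (left-to-right, non-overlapping)
def pvRdd : List Char → List Char
  | [] => []
  | [c] => [c]
  | c :: d :: t => if c = '_' ∧ d = '_' then '_' :: pvRdd t else c :: pvRdd (d :: t)

theorem pvRdd_dd (t : List Char) : pvRdd ('_' :: '_' :: t) = '_' :: pvRdd t := by
  simp [pvRdd]

theorem pvRdd_cons_cons (c d : Char) (t : List Char) (h : ¬(c = '_' ∧ d = '_')) :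
    pvRdd (c :: d :: t) = c :: pvRdd (d :: t) := by
  simp only [pvRdd]; rw [if_neg h]

theorem pvGoDD_nil : ∀ (fuel : Nat) (acc : List Char),
    PySem.Chars.replace.go ['_', '_'] ['_'] fuel [] acc = acc.reverse := by
  intro fuel acc; cases fuel <;> simp [PySem.Chars.replace.go]

theorem pvReplaceGo_dd (l : List Char) : ∀ (fuel : Nat) (acc : List Char), l.length ≤ fuel →
    PySem.Chars.replace.go ['_', '_'] ['_'] fuel l acc = acc.reverse ++ pvRdd l := by
  induction l using pvRdd.induct with
  | case1 =>
    intro fuel acc _; rw [pvGoDD_nil]; simp [pvRdd]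
  | case2 c =>
    intro fuel acc h
    cases fuel with
    | zero => simp at h
    | succ f =>
      rw [PySem.Chars.replace.go]
      have hp : List.isPrefixOf ['_', '_'] [c] = false := by
        simp [List.isPrefixOf]
      simp only [hp, Bool.false_eq_true, if_false]
      rw [pvGoDD_nil]
      simp [pvRdd]
  | case3 c d t h ih =>
    obtain ⟨hc, hd⟩ := h; subst hc; subst hd
    intro fuel acc hlen
    cases fuel with
    | zero => simp at hlen
    | succ f =>
      rw [PySem.Chars.replace.go]
      have hp : List.isPrefixOf ['_', '_'] ('_' :: '_' :: t) = true := by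
        simp [List.isPrefixOf]
      simp only [hp, if_true]
      rw [show List.drop ['_', '_'].length ('_' :: '_' :: t) = t from rfl,
          show ['_'].reverse ++ acc = '_' :: acc from rfl]
      have hlen' : t.length ≤ f := by simp at hlen; omega
      rw [ih f ('_' :: acc) hlen', pvRdd_dd]
      simp
  | case4 c d t h ih =>
    intro fuel acc hlen
    cases fuel with
    | zero => simp at hlen
    | succ f =>
      rw [PySem.Chars.replace.go]
      have hp : List.isPrefixOf ['_', '_'] (c :: d :: t) = false := by
        cases hbc : (('_' : Char) == c) with
        | false => simp [List.isPrefixOf, hbc]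
        | true =>
          cases hbd : (('_' : Char) == d) with
          | false => simp [List.isPrefixOf, hbc, hbd]
          | true =>
            exact absurd ⟨(beq_iff_eq.mp hbc).symm, (beq_iff_eq.mp hbd).symm⟩ h
      simp only [hp, Bool.false_eq_true, if_false]
      have hlen' : (d :: t).length ≤ f := by simp at hlen ⊢; omega
      rw [ih f (c :: acc) hlen', pvRdd_cons_cons c d t h]
      simp

theorem pvReplace_dd (s : List Char) :
    PySem.Chars.replace s ['_', '_'] ['_'] = pvRdd s := by
  have h := pvReplaceGo_dd s s.length [] le_rfl
  simp only [PySem.Chars.replace]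
  simp at h ⊢
  exact h

theorem pvRdd_length_le (l : List Char) : (pvRdd l).length ≤ l.length := by
  induction l using pvRdd.induct with
  | case1 => simp [pvRdd]
  | case2 c => simp [pvRdd]
  | case3 c d t h ih =>
    obtain ⟨hc, hd⟩ := h; subst hc; subst hd
    rw [pvRdd_dd]
    simp at ih ⊢; omega
  | case4 c d t h ih =>
    rw [pvRdd_cons_cons c d t h]
    simp at ih ⊢; omega

theorem pvRdd_length_lt (l : List Char) (h : ['_', '_'] <:+: l) :
    (pvRdd l).length < l.length := by
  induction l using pvRdd.induct with
  | case1 => simp at h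
  | case2 c => have := h.length_le; simp at this
  | case3 c d t hcd ih =>
    obtain ⟨hc, hd⟩ := hcd; subst hc; subst hd
    have := pvRdd_length_le t
    rw [pvRdd_dd]
    simp at this ⊢; omega
  | case4 c d t hcd ih =>
    rw [pvRdd_cons_cons c d t hcd]
    rcases List.infix_cons_iff.mp h with hp | hi
    · rw [List.cons_prefix_cons] at hp
      obtain ⟨h1, hp2⟩ := hp
      rw [List.cons_prefix_cons] at hp2
      exact absurd ⟨h1.symm, hp2.1.symm⟩ hcd
    · have := ih hi
      simp at this ⊢; omega

theorem pvIsIn_infix (n : List Char) (h : PySem.Chars.isIn ['_', '_'] n = true) :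
    ['_', '_'] <:+: n := by
  by_contra hni
  rw [← PySem.Chars.isIn_eq_false_iff] at hni
  rw [h] at hni
  simp at hni

theorem pvReplace_dd_length_lt (n : List Char) (h : PySem.Chars.isIn ['_', '_'] n = true) :
    (PySem.Chars.replace n ['_', '_'] ['_']).length < n.length := by
  rw [pvReplace_dd]
  exact pvRdd_length_lt n (pvIsIn_infix n h)

-- single-character replace is a map
def pvSub (x : Char) (c : Char) : Char := if c = x then '_' else c

theorem pvGoSingle_nil (x : Char) : ∀ (fuel : Nat) (acc : List Char),
    PySem.Chars.replace.go [x] ['_'] fuel [] acc = acc.reverse := by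
  intro fuel acc; cases fuel <;> simp [PySem.Chars.replace.go]

theorem pvReplaceGo_single (x : Char) (l : List Char) : ∀ (fuel : Nat) (acc : List Char),
    l.length ≤ fuel →
    PySem.Chars.replace.go [x] ['_'] fuel l acc = acc.reverse ++ l.map (pvSub x) := by
  induction l with
  | nil => intro fuel acc _; rw [pvGoSingle_nil]; simp
  | cons c t ih =>
    intro fuel acc h
    cases fuel with
    | zero => simp at h
    | succ f =>
      rw [PySem.Chars.replace.go]
      have hlen : t.length ≤ f := by simp at h; omega
      by_cases hx : x = c
      · subst hx
        have hp : List.isPrefixOf [x] (x :: t) = true := by simp [List.isPrefixOf]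
        simp only [hp, if_true]
        rw [show List.drop [x].length (x :: t) = t from rfl,
            show ['_'].reverse ++ acc = '_' :: acc from rfl]
        rw [ih f ('_' :: acc) hlen]
        simp [pvSub]
      · have hbc : (x == c) = false := beq_eq_false_iff_ne.mpr hx
        have hp : List.isPrefixOf [x] (c :: t) = false := by simp [List.isPrefixOf, hbc]
        simp only [hp, Bool.false_eq_true, if_false]
        rw [ih f (c :: acc) hlen]
        have hsub : pvSub x c = c := by
          unfold pvSub; rw [if_neg (fun hh => hx hh.symm)]
        simp [hsub]

theorem pvReplace_single (x : Char) (s : List Char) :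
    PySem.Chars.replace s [x] ['_'] = s.map (pvSub x) := by
  have h := pvReplaceGo_single x s s.length [] le_rfl
  simp only [PySem.Chars.replace]
  simp at h ⊢
  exact h

def pvToU (c : Char) : Char := if c = '.' ∨ c = '-' ∨ c = ' ' then '_' else c

theorem pvReplace_chain (s : List Char) :
    PySem.Chars.replace (PySem.Chars.replace (PySem.Chars.replace s ['.'] ['_']) ['-'] ['_']) [' '] ['_']
      = s.map pvToU := by
  rw [pvReplace_single, pvReplace_single, pvReplace_single, List.map_map, List.map_map]
  apply List.map_congr_left
  intro c _
  simp only [Function.comp, pvSub, pvToU]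
  by_cases h1 : c = '.' <;> by_cases h2 : c = '-' <;> by_cases h3 : c = ' ' <;>
    simp_all

def pvU (c : Char) : Bool := c == '_'

-- the maximal runs of non-separator characters, in order (current run, finished runs)
def pvSplitAux (p : Char → Bool) : List Char → List Char × List (List Char)
  | [] => ([], [])
  | c :: t =>
    let (cur, rs) := pvSplitAux p t
    if p c then ([], if cur.isEmpty then rs else cur :: rs)
    else (c :: cur, rs)

def pvSplitRuns (p : Char → Bool) (w : List Char) : List (List Char) :=
  if (pvSplitAux p w).1.isEmpty then (pvSplitAux p w).2
  else (pvSplitAux p w).1 :: (pvSplitAux p w).2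

theorem pvSplitAux_cons_sep {p : Char → Bool} {c : Char} (t : List Char) (h : p c = true) :
    pvSplitAux p (c :: t) = ([], pvSplitRuns p t) := by
  unfold pvSplitRuns
  rcases hsp : pvSplitAux p t with ⟨cur, rs⟩
  simp [pvSplitAux, hsp, h]

theorem pvSplitAux_cons_nonsep {p : Char → Bool} {c : Char} (t : List Char) (h : p c = false) :
    pvSplitAux p (c :: t) = (c :: (pvSplitAux p t).1, (pvSplitAux p t).2) := by
  rcases hsp : pvSplitAux p t with ⟨cur, rs⟩
  simp [pvSplitAux, hsp, h]

theorem pvSplitRuns_cons_sep {p : Char → Bool} {c : Char} (t : List Char) (h : p c = true) :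
    pvSplitRuns p (c :: t) = pvSplitRuns p t := by
  rw [pvSplitRuns, pvSplitAux_cons_sep t h]
  simp

theorem pvSplitRuns_cons_nonsep {p : Char → Bool} {c : Char} (t : List Char) (h : p c = false) :
    pvSplitRuns p (c :: t) = (c :: (pvSplitAux p t).1) :: (pvSplitAux p t).2 := by
  rw [pvSplitRuns, pvSplitAux_cons_nonsep t h]
  simp

theorem pvSplitAux_map (n : List Char) :
    pvSplitAux pvU (n.map pvToU) = pvSplitAux pvSepB n := by
  induction n with
  | nil => rfl
  | cons c t ih =>
    have hsep : pvU (pvToU c) = pvSepB c := by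
      unfold pvU pvToU pvSepB
      by_cases h1 : c = '.'
      · subst h1; decide
      · by_cases h2 : c = '-'
        · subst h2; decide
        · by_cases h3 : c = ' '
          · subst h3; decide
          · have e1 : (c == ' ') = false := beq_eq_false_iff_ne.mpr h3
            have e2 : (c == '.') = false := beq_eq_false_iff_ne.mpr h1
            have e3 : (c == '-') = false := beq_eq_false_iff_ne.mpr h2
            simp [h1, h2, h3, e1, e2, e3]
    cases hB : pvSepB c with
    | true =>
      rw [List.map_cons, pvSplitAux_cons_sep _ (by rw [hsep, hB]), pvSplitAux_cons_sep _ hB]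
      unfold pvSplitRuns
      rw [ih]
    | false =>
      have hid : pvToU c = c := by
        unfold pvToU
        rw [if_neg]
        intro hor
        rcases hor with h | h | h <;> simp [pvSepB, h] at hB
      have hUc : pvU c = false := by
        have hx := hsep
        rw [hB, hid] at hx
        exact hx
      rw [List.map_cons, hid, pvSplitAux_cons_nonsep _ hUc, pvSplitAux_cons_nonsep _ hB, ih]

theorem pvSplitAux_rdd (w : List Char) :
    pvSplitAux pvU (pvRdd w) = pvSplitAux pvU w := by
  induction w using pvRdd.induct with
  | case1 => rfl
  | case2 c => rfl
  | case3 c d t h ih =>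
    obtain ⟨hc, hd⟩ := h; subst hc; subst hd
    rw [pvRdd_dd, pvSplitAux_cons_sep _ rfl, pvSplitAux_cons_sep _ rfl, pvSplitRuns_cons_sep _ rfl]
    unfold pvSplitRuns
    rw [ih]
  | case4 c d t h ih =>
    rw [pvRdd_cons_cons c d t h]
    cases hUc : pvU c with
    | true =>
      rw [pvSplitAux_cons_sep _ hUc, pvSplitAux_cons_sep _ hUc]
      unfold pvSplitRuns
      rw [ih]
    | false =>
      rw [pvSplitAux_cons_nonsep _ hUc, pvSplitAux_cons_nonsep _ hUc, ih]

theorem pvCollapseGo_runs : ∀ (f : Nat) (w : List Char),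
    pvSplitRuns pvU (pvCollapseGo f w) = pvSplitRuns pvU w := by
  intro f
  induction f with
  | zero => intro w; rfl
  | succ f ih =>
    intro w
    by_cases h : PySem.Chars.isIn ['_', '_'] w = true
    · rw [pvCollapseGo, if_pos h, ih]
      unfold pvSplitRuns
      rw [pvReplace_dd, pvSplitAux_rdd]
    · rw [pvCollapseGo, if_neg h]

theorem pvSplitRuns_collapse (w : List Char) :
    pvSplitRuns pvU (pvCollapseLoop w) = pvSplitRuns pvU w := by
  unfold pvCollapseLoop
  exact pvCollapseGo_runs w.length w

theorem pvCollapseGo_noDD : ∀ (f : Nat) (w : List Char), w.length ≤ f →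
    PySem.Chars.isIn ['_', '_'] (pvCollapseGo f w) = false := by
  intro f
  induction f with
  | zero =>
    intro w h
    have : w = [] := by cases w <;> simp_all
    subst this; decide
  | succ f ih =>
    intro w hlen
    by_cases h : PySem.Chars.isIn ['_', '_'] w = true
    · rw [pvCollapseGo, if_pos h]
      exact ih _ (by have := pvReplace_dd_length_lt w h; omega)
    · rw [pvCollapseGo, if_neg h]
      simpa using h

theorem pvCollapse_noDD (w : List Char) :
    PySem.Chars.isIn ['_', '_'] (pvCollapseLoop w) = false := by
  unfold pvCollapseLoop
  exact pvCollapseGo_noDD w.length w le_rfl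

theorem pvNoDD_tail (c : Char) (t : List Char)
    (h : PySem.Chars.isIn ['_', '_'] (c :: t) = false) :
    PySem.Chars.isIn ['_', '_'] t = false := by
  rw [PySem.Chars.isIn_eq_false_iff] at h ⊢
  intro hin
  obtain ⟨s1, s2, rfl⟩ := hin
  exact h ⟨c :: s1, s2, rfl⟩

def pvTrimR (u : List Char) : List Char := (List.dropWhile pvU u.reverse).reverse

theorem pvTrimR_cons (a : Char) (t : List Char) (x : Char) (hx : x ∈ t) (hpx : pvU x = false) :
    pvTrimR (a :: t) = a :: pvTrimR t := by
  unfold pvTrimR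
  rw [List.reverse_cons, List.dropWhile_append]
  have hne : List.dropWhile pvU t.reverse ≠ [] := by
    intro hnil
    have hall := List.dropWhile_eq_nil_iff.mp hnil
    have := hall x (by simpa using hx)
    rw [hpx] at this
    simp at this
  rw [if_neg (by simpa using hne)]
  simp

theorem pvJoin_cons_head (c : Char) (X : List Char) (rs : List (List Char)) :
    PySem.Chars.join ['_'] ((c :: X) :: rs) = c :: PySem.Chars.join ['_'] (X :: rs) := by
  cases rs with
  | nil => rw [PySem.Chars.join_singleton, PySem.Chars.join_singleton]
  | cons r rs' => rw [PySem.Chars.join_cons_cons, PySem.Chars.join_cons_cons]; simp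

-- on a string with no double underscore and not starting with an underscore,
-- right-trimming underscores equals joining the non-underscore runs
theorem pvTrim_join : ∀ (n : Nat) (u : List Char), u.length ≤ n →
    PySem.Chars.isIn ['_', '_'] u = false → u.head? ≠ some '_' →
    pvTrimR u = PySem.Chars.join ['_'] (pvSplitRuns pvU u) := by
  intro n
  induction n with
  | zero =>
    intro u h _ _
    have : u = [] := by cases u <;> simp_all
    subst this; decide
  | succ n ih =>
    intro u hlen hdd hhead
    cases u with
    | nil => decide
    | cons c v =>
      have hc : c ≠ '_' := by intro hc; subst hc; exact hhead rfl
      have hUc : pvU c = false := by simp [pvU, hc]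
      cases v with
      | nil =>
        have h1 : pvSplitRuns pvU [c] = [[c]] := by
          rw [pvSplitRuns_cons_nonsep _ hUc]
          rfl
        rw [h1, PySem.Chars.join_singleton]
        simp [pvTrimR, pvU, beq_eq_false_iff_ne.mpr hc]
      | cons d s =>
        by_cases hd0 : d = '_'
        · subst hd0
          cases s with
          | nil =>
            have h1 : pvSplitRuns pvU [c, '_'] = [[c]] := by
              rw [pvSplitRuns_cons_nonsep _ hUc, pvSplitAux_cons_sep _ rfl]
              rfl
            rw [h1, PySem.Chars.join_singleton]
            simp [pvTrimR, pvU, beq_eq_false_iff_ne.mpr hc]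
          | cons e s' =>
            have he : e ≠ '_' := by
              intro heq; subst heq
              rw [PySem.Chars.isIn_eq_false_iff] at hdd
              exact hdd ⟨[c], s', rfl⟩
            have hUe : pvU e = false := by simp [pvU, he]
            have hdd2 : PySem.Chars.isIn ['_', '_'] (e :: s') = false :=
              pvNoDD_tail _ _ (pvNoDD_tail _ _ hdd)
            have ht : pvTrimR (c :: '_' :: e :: s') = c :: '_' :: pvTrimR (e :: s') := by
              rw [pvTrimR_cons c _ e (by simp) hUe, pvTrimR_cons '_' _ e (by simp) hUe]
            rcases hsp : pvSplitAux pvU s' with ⟨cur, rs⟩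
            have h1 : pvSplitAux pvU (e :: s') = (e :: cur, rs) := by
              rw [pvSplitAux_cons_nonsep _ hUe, hsp]
            have h3 : pvSplitRuns pvU (e :: s') = (e :: cur) :: rs := by
              rw [pvSplitRuns, h1]; simp
            have h2 : pvSplitRuns pvU (c :: '_' :: e :: s') = [c] :: (e :: cur) :: rs := by
              rw [pvSplitRuns_cons_nonsep _ hUc, pvSplitAux_cons_sep _ rfl, h3]
            rw [ht, h2, PySem.Chars.join_cons_cons]
            rw [ih (e :: s') (by simp at hlen ⊢; omega) hdd2 (by simp [he]), h3]
            simp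
        · have hUd : pvU d = false := by simp [pvU, hd0]
          have hdd2 : PySem.Chars.isIn ['_', '_'] (d :: s) = false := pvNoDD_tail _ _ hdd
          have ht : pvTrimR (c :: d :: s) = c :: pvTrimR (d :: s) :=
            pvTrimR_cons c _ d (by simp) hUd
          rcases hsp : pvSplitAux pvU s with ⟨cur, rs⟩
          have h1 : pvSplitAux pvU (d :: s) = (d :: cur, rs) := by
            rw [pvSplitAux_cons_nonsep _ hUd, hsp]
          have h3 : pvSplitRuns pvU (d :: s) = (d :: cur) :: rs := by
            rw [pvSplitRuns, h1]; simp
          have h2 : pvSplitRuns pvU (c :: d :: s) = (c :: d :: cur) :: rs := by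
            rw [pvSplitRuns_cons_nonsep _ hUc, h1]
          rw [ht, h2, pvJoin_cons_head]
          rw [ih (d :: s) (by simp at hlen ⊢; omega) hdd2 (by simp [hd0]), h3]

theorem pvStripChars_eq (u : List Char) :
    PySem.Chars.stripChars u ['_'] = pvTrimR (List.dropWhile pvU u) := by
  have hq : (fun c : Char => List.contains ['_'] c) = pvU := by
    funext c
    simp only [pvU]
    cases hb : c == '_' <;> simp_all
  simp only [PySem.Chars.stripChars, pvTrimR, hq]

-- on a string with no double underscore, stripping outer underscores equals joining
-- the non-underscore runs with single underscores
theorem pvStrip_eq_join (u : List Char) (h : PySem.Chars.isIn ['_', '_'] u = false) :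
    PySem.Chars.stripChars u ['_'] = PySem.Chars.join ['_'] (pvSplitRuns pvU u) := by
  rw [pvStripChars_eq]
  cases u with
  | nil => decide
  | cons c t =>
    by_cases hc : c = '_'
    · subst hc
      rw [List.dropWhile_cons, if_pos (show pvU '_' = true from rfl)]
      rw [pvSplitRuns_cons_sep _ rfl]
      cases t with
      | nil => decide
      | cons d s =>
        have hd : d ≠ '_' := by
          intro hdeq; subst hdeq
          rw [PySem.Chars.isIn_eq_false_iff] at h
          exact h ⟨[], s, rfl⟩
        rw [List.dropWhile_cons, if_neg (by simp [pvU, hd])]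
        exact pvTrim_join (d :: s).length (d :: s) le_rfl (pvNoDD_tail _ _ h) (by simp [hd])
    · rw [List.dropWhile_cons, if_neg (by simp [pvU, hc])]
      exact pvTrim_join (c :: t).length (c :: t) le_rfl h (by simp [hc])

-- ---------- B's streaming pass computes the joined runs ----------

-- what the machine still emits after the first character has been emitted:
-- pending records whether a separator has been seen since
def pvTail : List Char → Bool → List Char
  | [], _ => []
  | c :: t, pending =>
    if pvSepB c then pvTail t true
    else (if pending then ['_'] else []) ++ c :: pvTail t false

theorem pvSM_out_ne (l : List Char) : ∀ (out : List Char) (pending : Bool), out ≠ [] →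
    pvSM l out pending = out.reverse ++ pvTail l pending := by
  induction l with
  | nil => intro out pending _; simp [pvSM, pvTail]
  | cons c t ih =>
    intro out pending h
    have hemp : out.isEmpty = false := by simpa using h
    by_cases hc : pvSepB c = true
    · rw [pvSM, if_pos hc, pvTail, if_pos hc, hemp]
      exact ih out true h
    · have hcf : pvSepB c = false := by simpa using hc
      rw [pvSM, if_neg hc, pvTail, if_neg hc]
      rw [ih (c :: (if pending then '_' :: out else out)) false (by simp)]
      cases pending <;> simp

theorem pvTail_spec : ∀ t : List Char,
    pvTail t false = (pvSplitAux pvSepB t).1 ++ (pvSplitAux pvSepB t).2.flatMap (fun r => '_' :: r)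
    ∧ pvTail t true = (pvSplitRuns pvSepB t).flatMap (fun r => '_' :: r) := by
  intro t
  induction t with
  | nil => constructor <;> simp [pvTail, pvSplitAux, pvSplitRuns]
  | cons c t ih =>
    obtain ⟨ihf, iht⟩ := ih
    by_cases hc : pvSepB c = true
    · constructor
      · rw [pvTail, if_pos hc, pvSplitAux_cons_sep t hc, iht]
        simp
      · rw [pvTail, if_pos hc, pvSplitRuns_cons_sep t hc, iht]
    · have hcf : pvSepB c = false := by simpa using hc
      constructor
      · rw [pvTail, if_neg hc, pvSplitAux_cons_nonsep t hcf, ihf]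
        simp
      · rw [pvTail, if_neg hc, pvSplitRuns_cons_nonsep t hcf, ihf]
        simp

theorem pvJoin_flat (r : List Char) (rs : List (List Char)) :
    PySem.Chars.join ['_'] (r :: rs) = r ++ rs.flatMap (fun x => '_' :: x) := by
  induction rs generalizing r with
  | nil => rw [PySem.Chars.join_singleton]; simp
  | cons r2 rs ih => rw [PySem.Chars.join_cons_cons, ih r2]; simp

theorem pvSM_spec (l : List Char) :
    pvSM l [] false = PySem.Chars.join ['_'] (pvSplitRuns pvSepB l) := by
  induction l with
  | nil => simp [pvSM, pvSplitRuns, pvSplitAux, PySem.Chars.join, List.intercalate]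
  | cons c t ih =>
    by_cases hc : pvSepB c = true
    · rw [pvSM, if_pos hc, show (!(List.isEmpty ([] : List Char))) = false from rfl, ih,
          pvSplitRuns_cons_sep t hc]
    · have hcf : pvSepB c = false := by simpa using hc
      rw [pvSM, if_neg hc]
      rw [show (c :: (if false = true then '_' :: ([] : List Char) else [])) = [c] from rfl]
      rw [pvSM_out_ne t [c] false (by simp), (pvTail_spec t).1,
          pvSplitRuns_cons_nonsep t hcf, pvJoin_flat]
      simp

-- ===== VERDICT (by name: the statement is the Claim_ definition above) =====
theorem normalize_for_match_py_spec : Claim_equal_normalize_for_match_py := by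
  intro name _
  unfold Spec_normalize_for_match_py
  simp only [normalize_for_match_py, normalize_for_match_py_alt]
  rw [pvSufB_eq_A, pvPreB_eq_A, pvSM_spec]
  apply congrArg
  rw [pvStrip_eq_join _ (pvCollapse_noDD _), pvSplitRuns_collapse, pvReplace_chain]
  unfold pvSplitRuns
  rw [pvSplitAux_map]
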